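-- pv_equiv track=rewrite | github.com/jcmgray/quimb | quimb/experimental/operatorbuilder/hilbertspace.py | parse_edges_to_unique
-- ===== SOURCE A (Python) =====
-- def parse_edges_to_unique(edges):
--     """Given a list of edges, return a sorted list of unique sites and edges.
--
--     Parameters
--     ----------
--     edges : Iterable[tuple[hashable, hashable]]]
--         The edges to parse.
--
--     Returns
--     -------
--     sites : list of hashable
--         The unique sites in the edges, sorted.
--     edges : list of (hashable, hashable)
--         The unique edges, sorted.
--     """
--     sites = set()
--     uniq_edges = set()
--     for i, j in edges:
--         if j < i:
--             i, j = j, i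
--         sites.add(i)
--         sites.add(j)
--         uniq_edges.add((i, j))
--     return sorted(sites), sorted(uniq_edges)
-- ===== SOURCE B (Python) =====
-- def _dedup_sorted(xs):
--     """Collapse adjacent duplicates of an already-sorted list."""
--     if not xs:
--         return []
--     out = [xs[0]]
--     prev = xs[0]
--     for x in xs[1:]:
--         if x != prev:
--             out.append(x)
--         prev = x
--     return out
--
--
-- def parse_edges_to_unique(edges):
--     """Sorted unique sites and normalized unique edges.
--
--     Sort-then-scan: normalize and sort all edges, collapse adjacent
--     duplicates; then sort the endpoints of the deduplicated edges and
--     collapse adjacent duplicates again.  No hash sets are used.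
--     """
--     norm = sorted((i, j) if i <= j else (j, i) for i, j in edges)
--     uniq_edges = _dedup_sorted(norm)
--     flat = sorted(s for e in uniq_edges for s in e)
--     sites = _dedup_sorted(flat)
--     return sites, uniq_edges
-- ===== Notes on version B (the rewrite author's own statement) =====
-- stated objective: alternative
-- what changed: Replaces hash-set accumulation entirely with a sort-then-scan algorithm: edges are normalized, sorted and adjacent-deduplicated with no sets at all, and the sites are then obtained by sorting the endpoints of the deduplicated edges and collapsing adjacent duplicates again.
import Mathlib
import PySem

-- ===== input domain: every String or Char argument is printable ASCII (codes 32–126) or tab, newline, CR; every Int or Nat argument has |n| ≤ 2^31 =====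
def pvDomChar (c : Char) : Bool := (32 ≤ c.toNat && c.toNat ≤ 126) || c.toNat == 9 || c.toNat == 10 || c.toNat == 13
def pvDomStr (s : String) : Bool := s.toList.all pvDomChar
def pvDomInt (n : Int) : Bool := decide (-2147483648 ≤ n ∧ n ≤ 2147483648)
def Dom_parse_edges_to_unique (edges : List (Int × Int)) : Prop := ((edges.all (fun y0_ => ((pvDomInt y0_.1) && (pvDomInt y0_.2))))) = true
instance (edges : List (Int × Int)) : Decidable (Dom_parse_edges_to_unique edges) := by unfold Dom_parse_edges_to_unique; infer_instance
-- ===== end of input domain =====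

-- B replaces A's hash-set accumulation with a sort-then-scan algorithm (sort, collapse
-- adjacent duplicates, then derive the sites from the deduplicated edges); objective: alternative.

-- ===== PORT A =====
-- one loop: normalize each edge, add both endpoints to `sites`, add the pair to `uniq_edges`
def parse_edges_to_unique (edges : List (Int × Int)) : List Int × (List (Int × Int)) :=
  let st := edges.foldl
    (fun (st : PySem.Set Int × PySem.Set (Int × Int)) e =>
      let ij := if e.2 < e.1 then (e.2, e.1) else (e.1, e.2)
      ((st.1.add ij.1).add ij.2, st.2.add ij))
    (PySem.Set.empty, PySem.Set.empty)
  (PySem.List.sorted st.1 (fun x => x),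
   PySem.List.sorted2 st.2 (fun p => p.1) (fun p => p.2))

-- ===== PORT B =====
-- (i, j) if i <= j else (j, i)
def pvNorm (e : Int × Int) : Int × Int := if e.1 ≤ e.2 then e else (e.2, e.1)

-- `_dedup_sorted`: walk the list once keeping `out` and `prev`, appending when x != prev
def parse_edges_to_unique_dedup {α : Type} [DecidableEq α] (xs : List α) : List α :=
  match xs with
  | [] => []
  | x0 :: rest =>
    (rest.foldl (fun (st : List α × α) x =>
        ((if x ≠ st.2 then st.1 ++ [x] else st.1), x)) ([x0], x0)).1

def parse_edges_to_unique_alt (edges : List (Int × Int)) : List Int × (List (Int × Int)) :=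
  let norm := PySem.List.sorted2 (edges.map pvNorm) (fun p => p.1) (fun p => p.2)
  let uniq_edges := parse_edges_to_unique_dedup norm
  let flat := PySem.List.sorted (uniq_edges.flatMap (fun e => [e.1, e.2])) (fun x => x)
  let sites := parse_edges_to_unique_dedup flat
  (sites, uniq_edges)

-- ===== PRECONDITION & SPEC =====
def Spec_parse_edges_to_unique (edges : List (Int × Int)) (out : List Int × (List (Int × Int))) : Prop := out = parse_edges_to_unique_alt edges
instance (edges : List (Int × Int)) (out : List Int × (List (Int × Int))) : Decidable (Spec_parse_edges_to_unique edges out) := by unfold Spec_parse_edges_to_unique; infer_instance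

-- ===== CLAIM (what is proved, stated in full; the proofs are below) =====
def Claim_equal_parse_edges_to_unique : Prop := ∀ (edges : List (Int × Int)), Dom_parse_edges_to_unique edges → Spec_parse_edges_to_unique edges (parse_edges_to_unique edges)

-- ===== LEMMAS AND PROOFS =====

-- recursive form of B's dedup loop body (proof helper)
def pvDedupAux {α : Type} [DecidableEq α] (prev : α) : List α → List α
  | [] => []
  | x :: xs => if x ≠ prev then x :: pvDedupAux x xs else pvDedupAux x xs

theorem pvFold_eq_aux {α : Type} [DecidableEq α] (ys : List α) (acc : List α) (prev : α) :
    (ys.foldl (fun (st : List α × α) x =>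
        ((if x ≠ st.2 then st.1 ++ [x] else st.1), x)) (acc, prev)).1
      = acc ++ pvDedupAux prev ys := by
  induction ys generalizing acc prev with
  | nil => simp [pvDedupAux]
  | cons y t ih =>
    rw [List.foldl_cons]
    by_cases h : y = prev
    · rw [show ((if y ≠ (acc, prev).2 then (acc, prev).1 ++ [y] else (acc, prev).1, y)
          : List α × α) = (acc, y) by simp [h]]
      rw [ih]
      simp [pvDedupAux, h]
    · rw [show ((if y ≠ (acc, prev).2 then (acc, prev).1 ++ [y] else (acc, prev).1, y)
          : List α × α) = (acc ++ [y], y) by simp [h]]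
      rw [ih]
      simp [pvDedupAux, h]

theorem dedupAux_mem {α κ : Type} [DecidableEq α] [LinearOrder κ] (key : α → κ)
    (hinj : Function.Injective key) (ys : List α) (prev : α)
    (hp : (prev :: ys).Pairwise (fun a b => key a ≤ key b)) (z : α) :
    z ∈ pvDedupAux prev ys ↔ z ∈ ys ∧ z ≠ prev := by
  induction ys generalizing prev with
  | nil => simp [pvDedupAux]
  | cons y t ih =>
    rcases List.pairwise_cons.mp hp with ⟨hhead, htail⟩
    by_cases h : y = prev
    · subst h
      simp only [pvDedupAux, ne_eq, not_true_eq_false, if_false, ih y htail, List.mem_cons]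
      tauto
    · have hkprev_y : key prev ≤ key y := hhead y (List.mem_cons_self)
      rcases List.pairwise_cons.mp htail with ⟨hyt, _⟩
      simp only [pvDedupAux, ne_eq, h, not_false_eq_true, if_true, List.mem_cons,
        ih y htail]
      constructor
      · rintro (rfl | ⟨hzt, hzy⟩)
        · exact ⟨Or.inl rfl, h⟩
        · refine ⟨Or.inr hzt, ?_⟩
          rintro rfl
          exact h (hinj (le_antisymm (hyt z hzt) hkprev_y))
      · rintro ⟨(rfl | hzt), hzprev⟩
        · exact Or.inl rfl
        · by_cases hzy : z = y
          · exact Or.inl hzy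
          · exact Or.inr ⟨hzt, hzy⟩

theorem dedupAux_pairwise {α κ : Type} [DecidableEq α] [LinearOrder κ] (key : α → κ)
    (hinj : Function.Injective key) (ys : List α) (prev : α)
    (hp : (prev :: ys).Pairwise (fun a b => key a ≤ key b)) :
    (prev :: pvDedupAux prev ys).Pairwise (fun a b => key a < key b) := by
  induction ys generalizing prev with
  | nil => simp [pvDedupAux]
  | cons y t ih =>
    rcases List.pairwise_cons.mp hp with ⟨hhead, htail⟩
    rcases List.pairwise_cons.mp htail with ⟨hyt, _⟩
    by_cases h : y = prev
    · subst h
      simpa [pvDedupAux] using ih y htail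
    · have hlt : key prev < key y := by
        rcases lt_or_eq_of_le (hhead y (List.mem_cons_self)) with hlt | heq
        · exact hlt
        · exact absurd (hinj heq.symm) h
      simp only [pvDedupAux, ne_eq, h, not_false_eq_true, if_true]
      refine List.pairwise_cons.mpr ⟨?_, ih y htail⟩
      intro z hz
      rcases List.mem_cons.mp hz with rfl | hz'
      · exact hlt
      · have hzt : z ∈ t := ((dedupAux_mem key hinj t y htail z).mp hz').1
        exact lt_of_lt_of_le hlt (hyt z hzt)

-- MAIN: B's sort-then-dedup equals A's sort-of-set, for any injective sort key
theorem dedup_sorted_eq {α κ : Type} [DecidableEq α] [BEq α] [LawfulBEq α] [LinearOrder κ]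
    (key : α → κ) (hinj : Function.Injective key) (xs : List α) :
    parse_edges_to_unique_dedup (PySem.List.sorted xs key) =
      PySem.List.sorted (PySem.Set.ofList xs) key := by
  rcases hs : PySem.List.sorted xs key with _ | ⟨x0, rest⟩
  · have hxs : xs = [] := (PySem.List.sorted_eq_nil_iff xs key false).mp hs
    subst hxs
    rfl
  · have hp : (x0 :: rest).Pairwise (fun a b => key a ≤ key b) := by
      rw [← hs]; exact PySem.List.sorted_pairwise xs key
    have hd : parse_edges_to_unique_dedup (x0 :: rest) = x0 :: pvDedupAux x0 rest := by
      simp only [parse_edges_to_unique_dedup]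
      simpa using pvFold_eq_aux rest [x0] x0
    rw [hd]
    symm
    apply PySem.List.sorted_eq_of_perm_of_pairwise_lt
    · -- permutation: both nodup with the same members
      have hpwlt := dedupAux_pairwise key hinj rest x0 hp
      have hnd : (x0 :: pvDedupAux x0 rest).Nodup :=
        hpwlt.imp (fun hab => fun heq => absurd (congrArg key heq) (ne_of_lt hab))
      rw [List.perm_ext_iff_of_nodup hnd (PySem.Set.nodup_ofList xs)]
      intro z
      have hmemxs : z ∈ (x0 :: rest) ↔ z ∈ xs := by
        rw [← hs]; exact (PySem.List.sorted_perm xs key false).mem_iff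
      rw [PySem.Set.mem_ofList, ← hmemxs]
      simp only [List.mem_cons, dedupAux_mem key hinj rest x0 hp z]
      by_cases hz : z = x0 <;> simp [hz]
    · exact dedupAux_pairwise key hinj rest x0 hp

-- sorted2 with fst/snd keys is sorted with the lexicographic key
theorem sorted2_eq_sorted_toLex (xs : List (Int × Int)) :
    PySem.List.sorted2 xs (fun p => p.1) (fun p => p.2) =
      PySem.List.sorted xs (fun p => toLex (p.1, p.2)) := by
  rw [PySem.List.sorted_eq_foldl_insertBy]
  simp only [PySem.List.sorted2]
  congr 1
  funext acc x
  congr 1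
  funext a b
  by_cases h1 : a.1 < b.1 <;> by_cases h2 : b.1 < a.1 <;> by_cases h3 : a.2 < b.2 <;>
    simp [Prod.Lex.toLex_lt_toLex, h1, h2, h3] <;> omega

theorem toLexKey_inj : Function.Injective (fun p : Int × Int => toLex (p.1, p.2)) := by
  intro a b h
  have := toLex.injective h
  cases a; cases b; simpa using this

-- A's in-loop swap computes the same normalized pair as B's pvNorm
theorem norm_eq (e : Int × Int) :
    (if e.2 < e.1 then (e.2, e.1) else (e.1, e.2)) = pvNorm e := by
  unfold pvNorm
  rcases e with ⟨i, j⟩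
  by_cases h : j < i
  · simp [h, show ¬ i ≤ j by omega]
  · simp [h, show i ≤ j by omega]

-- A's paired fold splits into two independent folds
theorem foldA_split (edges : List (Int × Int)) (s : PySem.Set Int)
    (u : PySem.Set (Int × Int)) :
    edges.foldl
      (fun (st : PySem.Set Int × PySem.Set (Int × Int)) e =>
        let ij := if e.2 < e.1 then (e.2, e.1) else (e.1, e.2)
        ((st.1.add ij.1).add ij.2, st.2.add ij)) (s, u)
    = (edges.foldl (fun s e => PySem.Set.add (PySem.Set.add s (pvNorm e).1) (pvNorm e).2) s,
       edges.foldl (fun u e => PySem.Set.add u (pvNorm e)) u) := by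
  induction edges generalizing s u with
  | nil => rfl
  | cons e rest ih =>
    simp only [List.foldl_cons]
    rw [ih, norm_eq]

theorem mem_foldA_sites (edges : List (Int × Int)) (s : PySem.Set Int) (x : Int) :
    x ∈ edges.foldl (fun s e => PySem.Set.add (PySem.Set.add s (pvNorm e).1) (pvNorm e).2) s ↔
      x ∈ s ∨ ∃ e ∈ edges, x = (pvNorm e).1 ∨ x = (pvNorm e).2 := by
  induction edges generalizing s with
  | nil => simp
  | cons e rest ih =>
    simp only [List.foldl_cons, ih, PySem.Set.mem_add, List.mem_cons]
    constructor
    · rintro (((h | h) | h) | ⟨e', he', h⟩)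
      · exact Or.inl h
      · exact Or.inr ⟨e, Or.inl rfl, Or.inl h⟩
      · exact Or.inr ⟨e, Or.inl rfl, Or.inr h⟩
      · exact Or.inr ⟨e', Or.inr he', h⟩
    · rintro (h | ⟨e', (rfl | he'), (h | h)⟩)
      · exact Or.inl (Or.inl (Or.inl h))
      · exact Or.inl (Or.inl (Or.inr h))
      · exact Or.inl (Or.inr h)
      · exact Or.inr ⟨e', he', Or.inl h⟩
      · exact Or.inr ⟨e', he', Or.inr h⟩

theorem nodup_foldA_sites (edges : List (Int × Int)) (s : PySem.Set Int)
    (hs : List.Nodup s) :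
    List.Nodup (edges.foldl (fun s e => PySem.Set.add (PySem.Set.add s (pvNorm e).1) (pvNorm e).2) s) := by
  induction edges generalizing s with
  | nil => exact hs
  | cons e rest ih =>
    exact ih _ (PySem.Set.nodup_add _ _ (PySem.Set.nodup_add _ _ hs))

-- the two edge accumulators are literally the same list
theorem uniq_eq (edges : List (Int × Int)) :
    edges.foldl (fun u e => PySem.Set.add u (pvNorm e)) ([] : PySem.Set (Int × Int))
      = PySem.Set.ofList (edges.map pvNorm) := by
  rw [PySem.Set.ofList_eq_foldl, List.foldl_map]

-- B's uniq_edges list equals A's sorted edge set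
theorem edges_component_eq (edges : List (Int × Int)) :
    parse_edges_to_unique_dedup
        (PySem.List.sorted2 (edges.map pvNorm) (fun p => p.1) (fun p => p.2)) =
      PySem.List.sorted2 (PySem.Set.ofList (edges.map pvNorm))
        (fun p => p.1) (fun p => p.2) := by
  rw [sorted2_eq_sorted_toLex, sorted2_eq_sorted_toLex]
  exact dedup_sorted_eq _ toLexKey_inj (edges.map pvNorm)

-- ===== VERDICT (by name: the statement is the Claim_ definition above) =====
theorem parse_edges_to_unique_spec : Claim_equal_parse_edges_to_unique := by
  intro edges _
  unfold Spec_parse_edges_to_unique parse_edges_to_unique parse_edges_to_unique_alt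
  simp only [foldA_split, uniq_eq, PySem.Set.empty_eq, edges_component_eq]
  refine Prod.ext ?_ rfl
  -- sites: B = sorted set of the flattened deduplicated edges
  rw [show (fun x : Int => x) = (fun x : Int => id x) from rfl]
  rw [dedup_sorted_eq (fun x : Int => id x) (fun a b h => h)]
  apply PySem.List.sorted_eq_sorted_of_perm _ _ _ (fun a b h => h)
  rw [List.perm_ext_iff_of_nodup
    (nodup_foldA_sites edges _ List.nodup_nil) (PySem.Set.nodup_ofList _)]
  intro x
  rw [mem_foldA_sites, PySem.Set.mem_ofList]
  simp only [List.mem_flatMap, List.mem_cons, List.not_mem_nil, or_false]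
  constructor
  · rintro (h | ⟨e, he, h⟩)
    · simp at h
    · refine ⟨pvNorm e, ?_, by tauto⟩
      have : pvNorm e ∈ PySem.Set.ofList (edges.map pvNorm) := by
        rw [PySem.Set.mem_ofList]; exact List.mem_map_of_mem he
      rw [← (PySem.List.sorted_perm (PySem.Set.ofList (edges.map pvNorm))
        (fun p => toLex (p.1, p.2)) false).mem_iff] at this
      rw [← sorted2_eq_sorted_toLex] at this
      exact this
  · rintro ⟨p, hp, h⟩
    rw [sorted2_eq_sorted_toLex,
      (PySem.List.sorted_perm _ _ false).mem_iff, PySem.Set.mem_ofList] at hp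
    rcases List.mem_map.mp hp with ⟨e, he, rfl⟩
    exact Or.inr ⟨e, he, by tauto⟩
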